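-- pv_equiv track=rewrite | github.com/TakeshiFeit/labs | lab7/GUI/GUI/GUI.py | algo_without_func
-- ===== SOURCE A (Python) =====
-- def algo_without_func(num):
--     numbers = []
--     for i in range(0, num + 1, 2):
--         counter1 = 0
--         for symbol in str(i):
--             if symbol == '1' and counter1 == 0:
--                 counter1 += 1
--             else:
--                 counter1 = 2
--                 break
--             numbers.append(i) if (counter1 == 1) else ()
--     return numbers
-- ===== SOURCE B (Python) =====
-- def algo_without_func(num):
--     res = []
--     p = 10
--     while p <= num:
--         res.extend(range(p, min(2 * p - 1, num + 1), 2))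
--         p *= 10
--     return res
-- ===== Notes on version B (the rewrite author's own statement) =====
-- stated objective: faster
-- what changed: B generates the even numbers with leading digit 1 directly as ranges [10^k, min(2*10^k-2, num)] step 2 per power of ten, instead of testing the decimal string of every even number up to num.
import Mathlib
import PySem

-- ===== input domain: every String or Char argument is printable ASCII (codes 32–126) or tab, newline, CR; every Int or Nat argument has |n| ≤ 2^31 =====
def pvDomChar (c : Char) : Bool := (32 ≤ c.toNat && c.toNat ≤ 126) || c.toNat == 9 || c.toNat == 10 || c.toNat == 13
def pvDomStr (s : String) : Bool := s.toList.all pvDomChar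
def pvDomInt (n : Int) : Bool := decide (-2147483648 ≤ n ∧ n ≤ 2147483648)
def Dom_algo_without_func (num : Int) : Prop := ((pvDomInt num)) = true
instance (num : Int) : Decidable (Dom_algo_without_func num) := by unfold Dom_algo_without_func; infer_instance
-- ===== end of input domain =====

-- B replaces A's per-number decimal-string test with direct generation of the even
-- numbers in [10^k, 2*10^k) for each power of ten up to num (objective: faster).


-- ===== PORT A =====
-- inner 'for symbol in str(i)' loop with its break (returning = break; counter1 = 2 before a break is dead state)
def pvLoopA (i : Int) : List Char → Int → List Int → List Int
  | [], _, numbers => numbers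
  | symbol :: rest, counter1, numbers =>
      if symbol = '1' ∧ counter1 = 0 then
        let counter1' := counter1 + 1
        let numbers' := if counter1' = 1 then numbers ++ [i] else numbers
        pvLoopA i rest counter1' numbers'
      else numbers

def algo_without_func (num : Int) : List Int :=
  (PySem.List.pyRange 0 (num + 1) 2).foldl
    (fun numbers i => pvLoopA i (PySem.Int.toStr i).toList 0 numbers) []

-- ===== PORT B =====
-- 'while p <= num: res.extend(range(p, min(2*p-1, num+1), 2)); p *= 10' (hp is only a termination guard)
def pvAltLoop (num p : Int) (hp : 0 < p) (res : List Int) : List Int :=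
  if p ≤ num then
    pvAltLoop num (p * 10) (by omega) (res ++ PySem.List.pyRange p (min (2 * p - 1) (num + 1)) 2)
  else res
termination_by (num + 1 - p).toNat
decreasing_by omega

def algo_without_func_alt (num : Int) : List Int := pvAltLoop num 10 (by omega) []

-- ===== PRECONDITION & SPEC =====
def Spec_algo_without_func (num : Int) (out : List Int) : Prop := out = algo_without_func_alt num
instance (num : Int) (out : List Int) : Decidable (Spec_algo_without_func num out) := by unfold Spec_algo_without_func; infer_instance

-- ===== CLAIM (what is proved, stated in full; the proofs are below) =====
def Claim_equal_algo_without_func : Prop := ∀ (num : Int), Dom_algo_without_func num → Spec_algo_without_func num (algo_without_func num)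

-- ===== LEMMAS AND PROOFS =====

-- the leading decimal digit of n, as the recursion str-printing induces it
def pvLead (n : Nat) : Nat := if n < 10 then n else pvLead (n / 10)
decreasing_by omega

lemma pvLead_lt_ten (n : Nat) : pvLead n < 10 := by
  induction n using Nat.strong_induction_on with
  | _ n ih =>
    rw [pvLead]
    by_cases h : n < 10
    · simp [h]
    · simpa [h] using ih (n / 10) (by omega)

lemma pvLead_eq_one_iff (n : Nat) : pvLead n = 1 ↔ ∃ k : Nat, 10 ^ k ≤ n ∧ n < 2 * 10 ^ k := by
  induction n using Nat.strong_induction_on with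
  | _ n ih =>
    rw [pvLead]
    by_cases h : n < 10
    · simp only [h, if_true]
      constructor
      · rintro rfl; exact ⟨0, by norm_num⟩
      · rintro ⟨k, h1, h2⟩
        match k with
        | 0 => simp at h1 h2; omega
        | k + 1 =>
          have : 10 ≤ 10 ^ (k + 1) := by
            calc (10:ℕ) = 10 ^ 1 := by norm_num
            _ ≤ 10 ^ (k + 1) := Nat.pow_le_pow_right (by norm_num) (by omega)
          omega
    · simp only [h, if_false]
      rw [ih (n / 10) (by omega)]
      constructor
      · rintro ⟨k, h1, h2⟩
        refine ⟨k + 1, ?_, ?_⟩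
        · rw [pow_succ]
          rw [Nat.le_div_iff_mul_le (by norm_num)] at h1
          omega
        · rw [pow_succ]
          rw [Nat.div_lt_iff_lt_mul (by norm_num)] at h2
          omega
      · rintro ⟨k, h1, h2⟩
        match k with
        | 0 => simp at h1 h2; omega
        | k + 1 =>
          refine ⟨k, ?_, ?_⟩
          · rw [Nat.le_div_iff_mul_le (by norm_num)]
            rw [pow_succ] at h1; omega
          · rw [Nat.div_lt_iff_lt_mul (by norm_num)]
            rw [pow_succ] at h2; omega

lemma pvTdcAppend (f : Nat) : ∀ (n : Nat) (acc : List Char),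
    Nat.toDigitsCore 10 f n acc = Nat.toDigitsCore 10 f n [] ++ acc := by
  induction f with
  | zero => intro n acc; simp [Nat.toDigitsCore]
  | succ f ih =>
    intro n acc
    rw [Nat.toDigitsCore, Nat.toDigitsCore]
    by_cases h0 : n / 10 = 0
    · simp [h0]
    · simp only [h0, if_false]
      rw [ih (n / 10) ((n % 10).digitChar :: acc), ih (n / 10) [(n % 10).digitChar]]
      simp

lemma pvTdcHead (f : Nat) : ∀ (n : Nat), n < f →
    (Nat.toDigitsCore 10 f n []).head? = some (Nat.digitChar (pvLead n)) := by
  induction f with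
  | zero => intro n h; omega
  | succ f ih =>
    intro n h
    rw [Nat.toDigitsCore]
    by_cases h0 : n / 10 = 0
    · have hn : n < 10 := by omega
      have : n % 10 = n := by omega
      simp [h0, this, pvLead, hn]
    · simp only [h0, if_false]
      rw [pvTdcAppend]
      have hrec := ih (n / 10) (by omega)
      rcases hx : Nat.toDigitsCore 10 f (n / 10) [] with _ | ⟨y, t⟩
      · rw [hx] at hrec; simp at hrec
      · rw [hx] at hrec
        simp at hrec
        have hl : pvLead n = pvLead (n / 10) := by
          rw [pvLead]; simp [show ¬ n < 10 by omega]
        simp [hrec, hl]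

lemma pvDigitCharOne (l : Nat) (h : l < 10) : Nat.digitChar l = '1' ↔ l = 1 := by
  interval_cases l <;> simp [Nat.digitChar]

lemma pvHeadOneIff (x : Int) (hx : 0 ≤ x) :
    (PySem.Int.toChars x).head? = some '1' ↔ ∃ k : Nat, (10:Int) ^ k ≤ x ∧ x < 2 * 10 ^ k := by
  rw [show PySem.Int.toChars x = Nat.toDigits 10 x.toNat by
        simp [PySem.Int.toChars, not_lt.mpr hx]]
  rw [Nat.toDigits, pvTdcHead (x.toNat + 1) x.toNat (by omega)]
  rw [Option.some_inj, pvDigitCharOne _ (pvLead_lt_ten _), pvLead_eq_one_iff]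
  have hto := Int.toNat_of_nonneg hx
  constructor
  · rintro ⟨k, h1, h2⟩
    have hc : ((10 ^ k : Nat) : Int) = (10:Int) ^ k := by push_cast; ring
    exact ⟨k, by omega, by omega⟩
  · rintro ⟨k, h1, h2⟩
    have hc : ((10 ^ k : Nat) : Int) = (10:Int) ^ k := by push_cast; ring
    exact ⟨k, by omega, by omega⟩

lemma pvLoopA_one (i : Int) (rest : List Char) (ns : List Int) : pvLoopA i rest 1 ns = ns := by
  cases rest <;> simp [pvLoopA]

lemma pvLoopA_zero (i : Int) (cs : List Char) (ns : List Int) :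
    pvLoopA i cs 0 ns = if cs.head? = some '1' then ns ++ [i] else ns := by
  cases cs with
  | nil => simp [pvLoopA]
  | cons c rest =>
    by_cases hc : c = '1'
    · subst hc; simp [pvLoopA, pvLoopA_one]
    · simp [pvLoopA, hc]

lemma pvA_eq_filter (num : Int) :
    algo_without_func num =
      (PySem.List.pyRange 0 (num + 1) 2).filter
        (fun i => decide ((PySem.Int.toChars i).head? = some '1')) := by
  unfold algo_without_func
  rw [PySem.List.foldl_congr_mem _ _
        (fun numbers i => if (PySem.Int.toChars i).head? = some '1'
                then numbers ++ [i] else numbers) _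
        (by intro acc x _; rw [PySem.Int.toList_toStr, pvLoopA_zero])]
  rw [PySem.List.foldl_append_ite_eq_filter]
  simp

lemma pvPairwiseRangeTwo (a b : Int) : (PySem.List.pyRange a b 2).Pairwise (· < ·) := by
  rw [PySem.List.pyRange_of_pos a b (by norm_num)]
  exact (List.pairwise_lt_range).map _ (fun x y h => by omega)

lemma pvMemAlt (num : Int) : ∀ (p : Int) (hp : 0 < p) (acc : List Int), 2 ∣ p → ∀ (x : Int),
    (x ∈ pvAltLoop num p hp acc ↔
      x ∈ acc ∨ (x ≤ num ∧ 2 ∣ x ∧ ∃ k : Nat, 10 ^ k * p ≤ x ∧ x < 2 * (10 ^ k * p))) := by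
  intro p hp acc
  induction p, hp, acc using pvAltLoop.induct (num := num) with
  | case1 p hp acc hle ih =>
    intro h2 x
    rw [pvAltLoop, if_pos hle]
    rw [ih (by omega) x]
    rw [List.mem_append,
        PySem.List.mem_pyRange_iff_of_pos (by norm_num) x]
    constructor
    · rintro ((hacc | hR) | ⟨hn, hd, k, h1, h2'⟩)
      · exact Or.inl hacc
      · refine Or.inr ⟨by omega, by omega, 0, ?_, ?_⟩ <;> simp <;> omega
      · refine Or.inr ⟨hn, hd, k + 1, ?_, ?_⟩
        · have : (10:Int) ^ (k + 1) * p = 10 ^ k * (p * 10) := by ring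
          omega
        · have : 2 * ((10:Int) ^ (k + 1) * p) = 2 * (10 ^ k * (p * 10)) := by ring
          omega
    · rintro (hacc | ⟨hn, hd, k, h1, h2'⟩)
      · exact Or.inl (Or.inl hacc)
      · match k with
        | 0 =>
          simp only [pow_zero, one_mul] at h1 h2'
          exact Or.inl (Or.inr ⟨h1, by omega, by omega⟩)
        | k + 1 =>
          refine Or.inr ⟨hn, hd, k, ?_, ?_⟩
          · have : (10:Int) ^ (k + 1) * p = 10 ^ k * (p * 10) := by ring
            omega
          · have : 2 * ((10:Int) ^ (k + 1) * p) = 2 * (10 ^ k * (p * 10)) := by ring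
            omega
  | case2 p hp acc hle =>
    intro h2 x
    rw [pvAltLoop, if_neg hle]
    constructor
    · exact Or.inl
    · rintro (hacc | ⟨hn, hd, k, h1, h2'⟩)
      · exact hacc
      · exfalso
        have hk : (1:Int) ≤ 10 ^ k := one_le_pow₀ (by norm_num)
        nlinarith

lemma pvPwAlt (num : Int) : ∀ (p : Int) (hp : 0 < p) (acc : List Int),
    acc.Pairwise (· < ·) → (∀ a ∈ acc, a < p) → (pvAltLoop num p hp acc).Pairwise (· < ·) := by
  intro p hp acc
  induction p, hp, acc using pvAltLoop.induct (num := num) with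
  | case1 p hp acc hle ih =>
    intro hpw hlt
    rw [pvAltLoop, if_pos hle]
    apply ih
    · rw [List.pairwise_append]
      refine ⟨hpw, pvPairwiseRangeTwo _ _, ?_⟩
      intro a ha b hb
      have := (PySem.List.mem_pyRange_iff_of_pos (by norm_num) b).mp hb
      have := hlt a ha
      omega
    · intro a ha
      rcases List.mem_append.mp ha with h | h
      · have := hlt a h; omega
      · have := (PySem.List.mem_pyRange_iff_of_pos (by norm_num) a).mp h
        omega
  | case2 p hp acc hle =>
    intro hpw _
    rw [pvAltLoop, if_neg hle]; exact hpw

lemma pvMemA (num x : Int) :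
    x ∈ algo_without_func num ↔
      (0 ≤ x ∧ x < num + 1 ∧ 2 ∣ x ∧ ∃ k : Nat, (10:Int) ^ k ≤ x ∧ x < 2 * 10 ^ k) := by
  rw [pvA_eq_filter, List.mem_filter, PySem.List.mem_pyRange_iff_of_pos (by norm_num) x]
  simp only [decide_eq_true_eq, Int.sub_zero]
  constructor
  · rintro ⟨⟨h0, hn, hd⟩, hh⟩
    exact ⟨h0, hn, hd, (pvHeadOneIff x h0).mp hh⟩
  · rintro ⟨h0, hn, hd, hk⟩
    exact ⟨⟨h0, hn, hd⟩, (pvHeadOneIff x h0).mpr hk⟩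

lemma pvPairwiseA (num : Int) : (algo_without_func num).Pairwise (· < ·) := by
  rw [pvA_eq_filter]
  exact List.Pairwise.sublist List.filter_sublist (pvPairwiseRangeTwo _ _)

-- ===== VERDICT (by name: the statement is the Claim_ definition above) =====
theorem algo_without_func_spec : Claim_equal_algo_without_func := by
  intro num _
  unfold Spec_algo_without_func algo_without_func_alt
  have hApw := pvPairwiseA num
  have hBpw := pvPwAlt num 10 (by omega) [] (by simp) (by simp)
  have hmem : ∀ x, x ∈ pvAltLoop num 10 (by omega) [] ↔ x ∈ algo_without_func num := by
    intro x
    rw [pvMemAlt num 10 (by omega) [] (by omega) x, pvMemA num x]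
    simp only [List.not_mem_nil, false_or]
    constructor
    · rintro ⟨hn, hd, k, h1, h2⟩
      have hk : (1:Int) ≤ 10 ^ k := one_le_pow₀ (by norm_num)
      refine ⟨by nlinarith, by omega, hd, k + 1, ?_, ?_⟩
      · have : (10:Int) ^ (k + 1) = 10 ^ k * 10 := by ring
        omega
      · have : 2 * (10:Int) ^ (k + 1) = 2 * (10 ^ k * 10) := by ring
        omega
    · rintro ⟨h0, hn, hd, k, h1, h2⟩
      match k with
      | 0 => simp at h1 h2; omega
      | k + 1 =>
        refine ⟨by omega, hd, k, ?_, ?_⟩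
        · have : (10:Int) ^ (k + 1) = 10 ^ k * 10 := by ring
          omega
        · have : 2 * (10:Int) ^ (k + 1) = 2 * (10 ^ k * 10) := by ring
          omega
  have hperm : (pvAltLoop num 10 (by omega) []).Perm (algo_without_func num) :=
    (List.perm_ext_iff_of_nodup (hBpw.imp ne_of_lt) (hApw.imp ne_of_lt)).mpr hmem
  calc algo_without_func num
      = PySem.List.sorted (algo_without_func num) (fun x => x) :=
        (PySem.List.sorted_eq_self_of_pairwise _ _ (hApw.imp le_of_lt)).symm
    _ = pvAltLoop num 10 (by omega) [] :=
        PySem.List.sorted_eq_of_perm_of_pairwise_lt _ _ _ hperm hBpw
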